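-- pv_equiv track=rewrite | github.com/GerroPogi/caih | src/pages/explanations.py | lower_headings
-- ===== SOURCE A (Python) =====
-- def lower_headings(markdown: str, amount: int = 1):
--     line_by_line = markdown.split("\n")
--     new_lines = []
--
--     for line in line_by_line:
--         if line.startswith("#"):
--             # Add the extra hashes to the start
--             new_lines.append("#" * amount + line)
--         else:
--             new_lines.append(line)
--
--     return "\n".join(new_lines)
-- ===== SOURCE B (Python) =====
-- def lower_headings(markdown: str, amount: int = 1):
--     # single left-to-right character scan: no line list is built;
--     # extra hashes are emitted whenever a '#' is seen at a line start
--     out = []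
--     at_line_start = True
--     for ch in markdown:
--         if at_line_start and ch == "#":
--             out.append("#" * amount)
--         out.append(ch)
--         at_line_start = ch == "\n"
--     return "".join(out)
-- ===== Notes on version B (the rewrite author's own statement) =====
-- stated objective: alternative
-- what changed: Replaced split-into-lines / per-line rebuild / join with a single left-to-right character scan that tracks a line-start flag and emits the extra hashes inline, building no intermediate line list.
import Mathlib
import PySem

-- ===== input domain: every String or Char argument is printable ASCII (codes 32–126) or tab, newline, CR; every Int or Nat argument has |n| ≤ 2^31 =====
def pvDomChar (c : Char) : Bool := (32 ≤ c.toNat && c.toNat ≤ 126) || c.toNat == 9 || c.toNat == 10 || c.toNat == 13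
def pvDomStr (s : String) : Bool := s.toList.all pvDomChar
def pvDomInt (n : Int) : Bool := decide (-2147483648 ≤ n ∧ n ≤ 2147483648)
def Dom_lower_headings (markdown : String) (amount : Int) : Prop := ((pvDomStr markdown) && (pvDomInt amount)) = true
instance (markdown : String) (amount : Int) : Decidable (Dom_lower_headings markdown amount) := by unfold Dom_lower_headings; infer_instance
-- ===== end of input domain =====

-- B replaces A's split/loop/join over a line list by a single character scan with a line-start flag (alternative decomposition, same cost).

-- ===== PORT A =====
-- A: split on "\n", rebuild each line (prepend "#"*amount if it starts with "#"), join with "\n".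
-- "#" * amount is ported by hand as PySem.List.pyRepeat ['#'] amount (exact: Python str*int on this literal).
def lower_headings (markdown : String) (amount : Int) : String :=
  let line_by_line := PySem.Chars.splitOn markdown.toList ['\n']
  let new_lines := line_by_line.foldl
    (fun acc line =>
      if PySem.Chars.startswith line ['#'] then
        acc ++ [PySem.List.pyRepeat ['#'] amount ++ line]
      else
        acc ++ [line]) []
  String.ofList (PySem.Chars.join ['\n'] new_lines)

-- ===== PORT B =====
-- B: one fold over the characters with state (output so far, at_line_start flag).
def lower_headings_alt (markdown : String) (amount : Int) : String :=
  let r := markdown.toList.foldl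
    (fun (p : List Char × Bool) ch =>
      let out := if p.2 && (ch == '#') then p.1 ++ PySem.List.pyRepeat ['#'] amount else p.1
      (out ++ [ch], ch == '\n')) ([], true)
  String.ofList r.1

-- ===== PRECONDITION & SPEC =====
def Spec_lower_headings (markdown : String) (amount : Int) (out : String) : Prop := out = lower_headings_alt markdown amount
instance (markdown : String) (amount : Int) (out : String) : Decidable (Spec_lower_headings markdown amount out) := by unfold Spec_lower_headings; infer_instance

-- ===== CLAIM (what is proved, stated in full; the proofs are below) =====
def Claim_equal_lower_headings : Prop := ∀ (markdown : String) (amount : Int), Dom_lower_headings markdown amount → Spec_lower_headings markdown amount (lower_headings markdown amount)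

-- ===== LEMMAS AND PROOFS =====

-- reference single-char split on '\n'
def mySplit : List Char → List (List Char)
  | [] => [[]]
  | c :: cs =>
    if c = '\n' then [] :: mySplit cs
    else
      match mySplit cs with
      | [] => [[c]]
      | h :: t => (c :: h) :: t

def consHead (pre : List Char) : List (List Char) → List (List Char)
  | [] => [pre]
  | h :: t => (pre ++ h) :: t

theorem mySplit_ne_nil (cs : List Char) : mySplit cs ≠ [] := by
  cases cs with
  | nil => simp [mySplit]
  | cons c cs =>
    simp only [mySplit]
    split_ifs
    · simp
    · cases h : mySplit cs <;> simp

theorem consHead_nil_of_ne (xs : List (List Char)) (h : xs ≠ []) : consHead [] xs = xs := by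
  cases xs with
  | nil => exact absurd rfl h
  | cons a t => simp [consHead]

theorem consHead_snoc (pre : List Char) (c : Char) (xs : List (List Char)) :
    consHead (pre ++ [c]) xs = consHead pre (consHead [c] xs) := by
  cases xs <;> simp [consHead]

theorem mySplit_cons_ne (c : Char) (cs : List Char) (h : ¬ c = '\n') :
    mySplit (c :: cs) = consHead [c] (mySplit cs) := by
  simp only [mySplit, if_neg h]
  cases hm : mySplit cs <;> simp [consHead]

theorem go_eq (fuel : Nat) : ∀ (l cur : List Char) (accs : List (List Char)),
    l.length < fuel →
    PySem.Chars.splitOn.go ['\n'] fuel l cur accs = accs.reverse ++ consHead cur.reverse (mySplit l) := by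
  induction fuel with
  | zero => intro l cur accs h; omega
  | succ f ih =>
    intro l cur accs h
    cases l with
    | nil =>
      rw [PySem.Chars.splitOn.go]
      simp [consHead, mySplit]
      omega
    | cons c rest =>
      rw [PySem.Chars.splitOn.go]
      by_cases hc : c = '\n'
      · subst hc
        have hpre : List.isPrefixOf ['\n'] ('\n' :: rest) = true := by
          simp [List.isPrefixOf]
        simp only [hpre, if_pos]
        have hlen : rest.length < f := by simp at h; omega
        rw [show List.drop (List.length ['\n']) ('\n' :: rest) = rest by simp]
        rw [ih rest [] (cur.reverse :: accs) hlen]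
        rw [show ([] : List Char).reverse = [] from rfl,
            consHead_nil_of_ne _ (mySplit_ne_nil rest)]
        simp [mySplit, consHead]
      · have hpre : List.isPrefixOf ['\n'] (c :: rest) = false := by
          simp [List.isPrefixOf]
          intro hcc
          exact absurd hcc.symm hc
        have hlen : rest.length < f := by simp at h; omega
        rw [if_neg (by simp [hpre])]
        rw [ih rest (c :: cur) accs hlen]
        rw [mySplit_cons_ne c rest hc]
        simp [consHead_snoc]

theorem splitOn_eq (cs : List Char) : PySem.Chars.splitOn cs ['\n'] = mySplit cs := by
  unfold PySem.Chars.splitOn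
  rw [go_eq (cs.length + 1) cs [] [] (by omega)]
  simp [consHead_nil_of_ne _ (mySplit_ne_nil cs)]

-- the per-line rewrite A performs
def fLine (hs line : List Char) : List Char :=
  if PySem.Chars.startswith line ['#'] then hs ++ line else line

-- join with '\n' of the rewritten lines, first line already rewritten or not
def JA (hs : List Char) : List (List Char) → List Char
  | [] => []
  | [h] => fLine hs h
  | h :: t => fLine hs h ++ '\n' :: JA hs t

def KA (hs : List Char) : List (List Char) → List Char
  | [] => []
  | [h] => h
  | h :: t => h ++ '\n' :: JA hs t

def KTail (hs : List Char) : List (List Char) → List Char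
  | [] => []
  | h :: t => '\n' :: JA hs (h :: t)

theorem JA_cons (hs h : List Char) (t : List (List Char)) :
    JA hs (h :: t) = fLine hs h ++ KTail hs t := by
  cases t <;> simp [JA, KTail]

theorem KA_cons (hs h : List Char) (t : List (List Char)) :
    KA hs (h :: t) = h ++ KTail hs t := by
  cases t <;> simp [KA, KTail]

theorem fLine_cons (hs : List Char) (c : Char) (h : List Char) :
    fLine hs (c :: h) = (if c == '#' then hs else []) ++ c :: h := by
  by_cases hc : c = '#'
  · subst hc; simp [fLine, PySem.Chars.startswith, List.isPrefixOf]
  · simp only [fLine, PySem.Chars.startswith, List.isPrefixOf]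
    simp [hc]
    exact fun h => absurd h.symm hc

theorem JA_eq_join (hs : List Char) (ps : List (List Char)) :
    PySem.Chars.join ['\n'] (ps.map (fLine hs)) = JA hs ps := by
  induction ps with
  | nil => simp [PySem.Chars.join_nil, JA]
  | cons h t ih =>
    cases t with
    | nil => simp [PySem.Chars.join_singleton, JA]
    | cons h2 t2 =>
      simp only [List.map_cons]
      rw [PySem.Chars.join_cons_cons]
      simp only [List.map_cons] at ih
      rw [ih]
      simp [JA]

-- B's scan, functionally
def goB (hs : List Char) : Bool → List Char → List Char
  | _, [] => []
  | start, c :: cs => (if start && (c == '#') then hs else []) ++ c :: goB hs (c == '\n') cs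

theorem foldlB (hs : List Char) (cs : List Char) : ∀ (out : List Char) (start : Bool),
    (cs.foldl (fun (p : List Char × Bool) ch =>
      let o := if p.2 && (ch == '#') then p.1 ++ hs else p.1
      (o ++ [ch], ch == '\n')) (out, start)).1 = out ++ goB hs start cs := by
  induction cs with
  | nil => intro out start; simp [goB]
  | cons c cs ih =>
    intro out start
    simp only [List.foldl_cons]
    rw [ih]
    simp only [goB]
    split_ifs <;> simp_all

theorem foldlA (hs : List Char) (ps : List (List Char)) : ∀ (acc : List (List Char)),
    ps.foldl (fun acc line =>
      if PySem.Chars.startswith line ['#'] then acc ++ [hs ++ line] else acc ++ [line]) acc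
      = acc ++ ps.map (fLine hs) := by
  induction ps with
  | nil => intro acc; simp
  | cons p ps ih =>
    intro acc
    simp only [List.foldl_cons, List.map_cons]
    by_cases hp : PySem.Chars.startswith p ['#'] = true <;>
      simp [hp, ih, fLine]

theorem main_inv (hs : List Char) (cs : List Char) :
    goB hs true cs = JA hs (mySplit cs) ∧ goB hs false cs = KA hs (mySplit cs) := by
  induction cs with
  | nil =>
    constructor <;> simp [goB, mySplit, JA, KA, fLine, PySem.Chars.startswith, List.isPrefixOf]
  | cons c cs ih =>
    obtain ⟨ih1, ih2⟩ := ih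
    by_cases hc : c = '\n'
    · subst hc
      have hsp : mySplit ('\n' :: cs) = [] :: mySplit cs := by simp [mySplit]
      obtain ⟨h, t, hm⟩ : ∃ h t, mySplit cs = h :: t := by
        cases hmm : mySplit cs with
        | nil => exact absurd hmm (mySplit_ne_nil cs)
        | cons a b => exact ⟨a, b, rfl⟩
      constructor
      · rw [hsp, hm, goB, JA_cons]
        have e1 : (('\n' : Char) == '#') = false := by decide
        have e2 : (('\n' : Char) == '\n') = true := by decide
        simp [e1, fLine, PySem.Chars.startswith, List.isPrefixOf, KTail]
        rw [ih1, hm]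
      · rw [hsp, hm, goB, KA_cons]
        simp [KTail]
        rw [ih1, hm]
    · obtain ⟨h, t, hm⟩ : ∃ h t, mySplit cs = h :: t := by
        cases hmm : mySplit cs with
        | nil => exact absurd hmm (mySplit_ne_nil cs)
        | cons a b => exact ⟨a, b, rfl⟩
      have hsp : mySplit (c :: cs) = (c :: h) :: t := by
        rw [mySplit_cons_ne c cs hc, hm]; rfl
      have hcn : (c == '\n') = false := by simp [hc]
      constructor
      · rw [hsp, goB, hcn, JA_cons, fLine_cons]
        rw [ih2, hm, KA_cons]
        by_cases h1 : (c == '#') = true <;> simp [h1]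
      · rw [hsp, goB, hcn, KA_cons]
        simp only [Bool.false_and, Bool.false_eq_true, if_false, List.nil_append]
        rw [ih2, hm, KA_cons]
        simp

-- ===== VERDICT (by name: the statement is the Claim_ definition above) =====
theorem lower_headings_spec : Claim_equal_lower_headings := by
  intro markdown amount _
  unfold Spec_lower_headings lower_headings lower_headings_alt
  simp only []
  rw [splitOn_eq, foldlA, foldlB]
  rw [List.nil_append, List.nil_append]
  rw [JA_eq_join, (main_inv _ _).1]
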